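-- pv_equiv track=rewrite | github.com/guycalledjeremy/newswatch | src/extraction/core_nlp/rule_based.py | _filter_duplicate_phrases
-- ===== SOURCE A (Python) =====
-- def _filter_duplicate_phrases(phrases: list) -> list:
--     """From a list of phrases, exclude phrases that makes up another phrase.
--
--     Args:
--         phrases: A list of phrases that might have duplicate contents.
--
--     Returns:
--         A list of phrases without duplicate contents.
--     """
--     filtered_phrases = []
--     for target_phrase in phrases:
--         # exclude phrases with only one verb
--         if len(target_phrase.split(' ')) == 1:
--             pass
--         # exclude phrases being a subset of another phrase
--         elif any((target_phrase in phrase and target_phrase != phrase) for phrase in phrases):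
--             pass
--         else:
--             filtered_phrases.append(target_phrase)
--
--     return filtered_phrases
-- ===== SOURCE B (Python) =====
-- def _filter_duplicate_phrases(phrases: list) -> list:
--     """Keep multi-word phrases that are not proper substrings of another phrase.
--
--     Sorts the distinct phrases by decreasing length and incrementally builds the
--     list of MAXIMAL phrases (phrases not contained in any previously kept one);
--     since the substring relation is transitive and equal-length distinct strings
--     cannot contain each other, a phrase is a proper substring of some phrase in
--     the list iff it is a proper substring of a maximal phrase, so the final pass
--     only checks against the (typically much smaller) maximal set.
--     """
--     maximal = []
--     for p in sorted(dict.fromkeys(phrases), key=len, reverse=True):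
--         if not any(p in m for m in maximal):
--             maximal.append(p)
--     return [p for p in phrases
--             if ' ' in p and not any(len(p) < len(m) and p in m for m in maximal)]
-- ===== Notes on version B (the rewrite author's own statement) =====
-- stated objective: alternative
-- what changed: Instead of A's full pairwise scan (each phrase tested for substring-and-not-equal against every phrase in the list), B sorts the distinct phrases by decreasing length, incrementally builds the list of maximal phrases (kept only if not contained in an already-kept one), and filters the input against that maximal set with a strict length test; correctness follows from transitivity of the substring relation.
import Mathlib
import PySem

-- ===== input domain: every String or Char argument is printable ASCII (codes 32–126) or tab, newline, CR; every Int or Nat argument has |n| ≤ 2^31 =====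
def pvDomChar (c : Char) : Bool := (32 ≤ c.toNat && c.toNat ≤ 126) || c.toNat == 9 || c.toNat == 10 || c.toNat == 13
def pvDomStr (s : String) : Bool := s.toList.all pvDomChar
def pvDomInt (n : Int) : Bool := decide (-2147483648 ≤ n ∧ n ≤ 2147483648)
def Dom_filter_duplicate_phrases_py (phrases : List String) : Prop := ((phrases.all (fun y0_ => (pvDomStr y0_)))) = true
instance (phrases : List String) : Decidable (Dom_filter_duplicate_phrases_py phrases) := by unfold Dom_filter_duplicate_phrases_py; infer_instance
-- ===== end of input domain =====

-- B sorts the distinct phrases by decreasing length, incrementally keeps only the maximal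
-- phrases, and filters against that set; alternative algorithm, same return value as A.


-- ===== PORT A =====
-- 'target_phrase.split(' ')' with the nonempty literal separator is Chars.splitOn (exact for sep ≠ "")
def filter_duplicate_phrases_py (phrases : List String) : List String :=
  phrases.foldl (fun filtered_phrases target_phrase =>
    if (PySem.Chars.splitOn target_phrase.toList [' ']).length = 1 then
      filtered_phrases
    else if phrases.any (fun phrase =>
        PySem.Str.isIn target_phrase phrase && !(target_phrase == phrase)) then
      filtered_phrases
    else
      filtered_phrases ++ [target_phrase]) []

-- ===== PORT B =====
-- Source B's 'maximal' list: distinct phrases sorted by decreasing length, kept only if not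
-- contained in an already-kept phrase
def pvMaximal (phrases : List String) : List String :=
  (PySem.List.sorted (PySem.List.dedup phrases) (fun s => PySem.Str.len s) true).foldl
    (fun kept p => if kept.any (fun m => PySem.Str.isIn p m) then kept else kept ++ [p]) []

def filter_duplicate_phrases_py_alt (phrases : List String) : List String :=
  phrases.filter (fun p =>
    PySem.Str.isIn " " p &&
      !((pvMaximal phrases).any (fun m =>
        decide (PySem.Str.len p < PySem.Str.len m) && PySem.Str.isIn p m)))

-- ===== PRECONDITION & SPEC =====
def Spec_filter_duplicate_phrases_py (phrases : List String) (out : List String) : Prop := out = filter_duplicate_phrases_py_alt phrases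
instance (phrases : List String) (out : List String) : Decidable (Spec_filter_duplicate_phrases_py phrases out) := by unfold Spec_filter_duplicate_phrases_py; infer_instance

-- ===== CLAIM (what is proved, stated in full; the proofs are below) =====
def Claim_equal_filter_duplicate_phrases_py : Prop := ∀ (phrases : List String), Dom_filter_duplicate_phrases_py phrases → Spec_filter_duplicate_phrases_py phrases (filter_duplicate_phrases_py phrases)

-- ===== LEMMAS AND PROOFS =====

-- length of a single-char split counts the separators
theorem splitOn_go_length (fuel : Nat) (l cur : List Char) (acc : List (List Char))
    (h : l.length < fuel) :
    (PySem.Chars.splitOn.go [' '] fuel l cur acc).length = acc.length + 1 + l.count ' ' := by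
  induction fuel generalizing l cur acc with
  | zero => omega
  | succ fuel ih =>
    cases l with
    | nil => simp [PySem.Chars.splitOn.go]
    | cons c rest =>
      by_cases hc : c = ' '
      · subst hc
        have : List.isPrefixOf [' '] (' ' :: rest) = true := by
          simp [List.isPrefixOf]
        simp only [PySem.Chars.splitOn.go, this, if_pos]
        rw [ih _ _ _ (by simpa using Nat.lt_of_succ_lt_succ h)]
        simp
        omega
      · have : List.isPrefixOf [' '] (c :: rest) = false := by
          simp [List.isPrefixOf]
          exact fun h => hc h.symm
        simp only [PySem.Chars.splitOn.go, this]
        rw [if_neg (by simp), ih _ _ _ (by simpa using Nat.lt_of_succ_lt_succ h)]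
        simp [hc]

theorem splitOn_length_one_iff (t : String) :
    ((PySem.Chars.splitOn t.toList [' ']).length = 1) ↔ ¬ (PySem.Str.isIn " " t = true) := by
  unfold PySem.Chars.splitOn
  rw [splitOn_go_length _ _ _ _ (by omega)]
  simp only [List.length_nil]
  rw [PySem.Str.isIn_iff_infix]
  have : (" ".toList) = [' '] := rfl
  rw [this, List.singleton_infix_iff]
  constructor
  · intro h hmem
    have := List.count_pos_iff.mpr hmem
    omega
  · intro h
    have : t.toList.count ' ' = 0 := by
      by_contra hne
      exact h (List.count_pos_iff.mp (by omega))
    omega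

-- the maximal-set fold only appends: the accumulator is a prefix of the result
theorem pvKeep_prefix (L : List String) (acc : List String) :
    acc <+: L.foldl
      (fun kept p => if kept.any (fun m => PySem.Str.isIn p m) then kept else kept ++ [p]) acc := by
  induction L generalizing acc with
  | nil => simp
  | cons hd tl ih =>
    simp only [List.foldl_cons]
    split
    · exact ih acc
    · exact List.IsPrefix.trans (List.prefix_append acc [hd]) (ih (acc ++ [hd]))

-- everything in the result came from the accumulator or the list
theorem pvKeep_subset (L : List String) (acc : List String) (x : String)
    (hx : x ∈ L.foldl
      (fun kept p => if kept.any (fun m => PySem.Str.isIn p m) then kept else kept ++ [p]) acc) :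
    x ∈ acc ∨ x ∈ L := by
  induction L generalizing acc with
  | nil => exact Or.inl (by simpa using hx)
  | cons hd tl ih =>
    simp only [List.foldl_cons] at hx
    split at hx
    · rcases ih _ hx with h | h
      · exact Or.inl h
      · exact Or.inr (List.mem_cons_of_mem _ h)
    · rcases ih _ hx with h | h
      · rcases List.mem_append.mp h with h | h
        · exact Or.inl h
        · exact Or.inr (List.mem_cons.mpr (Or.inl (by simpa using h)))
      · exact Or.inr (List.mem_cons_of_mem _ h)

-- COVERAGE: every processed phrase is an infix of some kept phrase
theorem pvKeep_covers (L : List String) (acc : List String) (q : String) (hq : q ∈ L) :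
    ∃ m ∈ L.foldl
      (fun kept p => if kept.any (fun m => PySem.Str.isIn p m) then kept else kept ++ [p]) acc,
      q.toList <:+: m.toList := by
  induction L generalizing acc with
  | nil => cases hq
  | cons hd tl ih =>
    simp only [List.foldl_cons]
    rcases List.mem_cons.mp hq with rfl | hq
    · by_cases h : acc.any (fun m => PySem.Str.isIn q m) = true
      · rw [if_pos h]
        obtain ⟨m, hm, hin⟩ := List.any_eq_true.mp h
        exact ⟨m, (pvKeep_prefix tl acc).subset hm, (PySem.Str.isIn_iff_infix q m).mp hin⟩
      · rw [if_neg h]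
        exact ⟨q, (pvKeep_prefix tl (acc ++ [q])).subset (by simp), List.infix_rfl⟩
    · split
      · exact ih acc hq
      · exact ih _ hq

-- "t is a proper substring of some phrase" ↔ "t is a substring of a strictly longer maximal phrase"
theorem maximal_char (phrases : List String) (t : String) :
    (phrases.any (fun phrase => PySem.Str.isIn t phrase && !(t == phrase)) = true) ↔
      ∃ m ∈ pvMaximal phrases,
        (decide (PySem.Str.len t < PySem.Str.len m) && PySem.Str.isIn t m) = true := by
  constructor
  · intro h
    obtain ⟨q, hq, hcond⟩ := List.any_eq_true.mp h
    simp only [Bool.and_eq_true, Bool.not_eq_true', beq_eq_false_iff_ne] at hcond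
    obtain ⟨hin, hne⟩ := hcond
    have hinf := (PySem.Str.isIn_iff_infix t q).mp hin
    have hle := hinf.length_le
    have hlt : t.toList.length < q.toList.length := by
      rcases Nat.lt_or_ge t.toList.length q.toList.length with h | h
      · exact h
      · exact absurd (String.toList_inj.mp (hinf.eq_of_length (by omega))) hne
    have hq' : q ∈ PySem.List.sorted (PySem.List.dedup phrases) (fun s => PySem.Str.len s) true :=
      (PySem.List.mem_sorted _ _ _ _).mpr ((PySem.List.mem_dedup phrases q).mpr hq)
    obtain ⟨m, hm, hqm⟩ := pvKeep_covers _ [] q hq'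
    refine ⟨m, hm, ?_⟩
    have htm : t.toList <:+: m.toList := hinf.trans hqm
    have hlen : q.toList.length ≤ m.toList.length := hqm.length_le
    simp only [Bool.and_eq_true, decide_eq_true_iff, PySem.Str.len_eq]
    exact ⟨by exact_mod_cast Nat.lt_of_lt_of_le hlt hlen,
      (PySem.Str.isIn_iff_infix t m).mpr htm⟩
  · rintro ⟨m, hm, hcond⟩
    simp only [Bool.and_eq_true, decide_eq_true_iff, PySem.Str.len_eq] at hcond
    obtain ⟨hlt, hin⟩ := hcond
    have hmem : m ∈ phrases := by
      rcases pvKeep_subset _ [] m hm with h | h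
      · cases h
      · exact (PySem.List.mem_dedup phrases m).mp ((PySem.List.mem_sorted _ _ _ _).mp h)
    refine List.any_eq_true.mpr ⟨m, hmem, ?_⟩
    simp only [Bool.and_eq_true, hin, true_and, Bool.not_eq_true', beq_eq_false_iff_ne]
    intro heq
    subst heq
    omega

-- ===== VERDICT (by name: the statement is the Claim_ definition above) =====
theorem filter_duplicate_phrases_py_spec : Claim_equal_filter_duplicate_phrases_py := by
  intro phrases _
  unfold Spec_filter_duplicate_phrases_py filter_duplicate_phrases_py filter_duplicate_phrases_py_alt
  have hstep : (fun (filtered_phrases : List String) (target_phrase : String) =>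
      if (PySem.Chars.splitOn target_phrase.toList [' ']).length = 1 then
        filtered_phrases
      else if phrases.any (fun phrase =>
          PySem.Str.isIn target_phrase phrase && !(target_phrase == phrase)) then
        filtered_phrases
      else
        filtered_phrases ++ [target_phrase]) =
      (fun (acc : List String) (t : String) =>
        if (decide (¬ (PySem.Chars.splitOn t.toList [' ']).length = 1) &&
            !(phrases.any (fun phrase => PySem.Str.isIn t phrase && !(t == phrase)))) = true
        then acc ++ [t] else acc) := by
    funext acc t
    by_cases h1 : (PySem.Chars.splitOn t.toList [' ']).length = 1
    · rw [if_pos h1, if_neg (by simp [h1])]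
    · rw [if_neg h1]
      by_cases h2 : phrases.any (fun phrase => PySem.Str.isIn t phrase && !(t == phrase)) = true
      · rw [if_pos h2, if_neg (by intro hh; rw [Bool.and_eq_true, h2] at hh; simp at hh)]
      · have hpos : (decide (¬ (PySem.Chars.splitOn t.toList [' ']).length = 1) &&
            !(phrases.any (fun phrase => PySem.Str.isIn t phrase && !(t == phrase)))) = true := by
          simp only [Bool.and_eq_true, decide_eq_true_iff, Bool.not_eq_true']
          exact ⟨h1, Bool.eq_false_iff.mpr h2⟩
        rw [if_neg h2, if_pos hpos]
  rw [hstep, PySem.List.foldl_append_if _ (fun t => t), List.map_id', List.nil_append]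
  apply List.filter_congr
  intro t _
  have h1 : decide (¬ (PySem.Chars.splitOn t.toList [' ']).length = 1) = PySem.Str.isIn " " t := by
    rw [Bool.eq_iff_iff]
    simp only [decide_eq_true_iff]
    rw [splitOn_length_one_iff]
    tauto
  have h2 : (phrases.any (fun phrase => PySem.Str.isIn t phrase && !(t == phrase))) =
      ((pvMaximal phrases).any (fun m =>
        decide (PySem.Str.len t < PySem.Str.len m) && PySem.Str.isIn t m)) := by
    rw [Bool.eq_iff_iff, maximal_char, List.any_eq_true]
  rw [h1, h2]
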